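-- pv_equiv track=rewrite | github.com/kube-nfv/RO | NG-RO/osm_ng_ro/ns_thread.py | _match_pci
-- ===== SOURCE A (Python) =====
-- def _match_pci(port_pci, mapping):
--     """
--     Check if port_pci matches with mapping.
--     The mapping can have brackets to indicate that several chars are accepted. e.g
--     pci '0000:af:10.1' matches with '0000:af:1[01].[1357]'
--     :param port_pci: text
--     :param mapping: text, can contain brackets to indicate several chars are available
--     :return: True if matches, False otherwise
--     """
--     if not port_pci or not mapping:
--         return False
--     if port_pci == mapping:
--         return True
--
--     mapping_index = 0
--     pci_index = 0
--     while True: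
--         bracket_start = mapping.find("[", mapping_index)
--
--         if bracket_start == -1:
--             break
--
--         bracket_end = mapping.find("]", bracket_start)
--         if bracket_end == -1:
--             break
--
--         length = bracket_start - mapping_index
--         if (
--             length
--             and port_pci[pci_index : pci_index + length]
--             != mapping[mapping_index:bracket_start]
--         ):
--             return False
--
--         if (
--             port_pci[pci_index + length]
--             not in mapping[bracket_start + 1 : bracket_end]
--         ):
--             return False
--
--         pci_index += length + 1
--         mapping_index = bracket_end + 1
--
--     if port_pci[pci_index:] != mapping[mapping_index:]:
--         return False
--
--     return True
-- ===== SOURCE B (Python) =====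
-- def _match_pci(port_pci, mapping):
--     """
--     Check if port_pci matches with mapping (brackets in mapping list accepted chars).
--     Two-phase: first tokenize mapping into literal segments and bracket character
--     classes (plus the trailing literal), then match port_pci against the token
--     list with a single position cursor.
--     """
--     if not port_pci or not mapping:
--         return False
--     if port_pci == mapping:
--         return True
--
--     tokens, trailing = _tokenize(mapping)
--
--     pos = 0
--     for kind, val in tokens:
--         if kind == "lit":
--             if port_pci[pos : pos + len(val)] != val:
--                 return False
--             pos += len(val)
--         else:  # "cls"
--             if pos >= len(port_pci) or port_pci[pos] not in val:
--                 return False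
--             pos += 1
--     return port_pci[pos:] == trailing
--
--
-- def _tokenize(mapping):
--     """Split mapping into ('lit', text) / ('cls', chars) tokens and a trailing literal."""
--     tokens = []
--     rest = mapping
--     while True:
--         j = rest.find("[")
--         if j == -1:
--             return tokens, rest
--         k = rest.find("]", j)
--         if k == -1:
--             return tokens, rest
--         if j > 0:
--             tokens.append(("lit", rest[:j]))
--         tokens.append(("cls", rest[j + 1 : k]))
--         rest = rest[k + 1 :]
-- ===== Notes on version B (the rewrite author's own statement) =====
-- stated objective: alternative
-- what changed: A interleaves scanning the mapping for brackets with matching in one index-juggling while-loop; B first tokenizes the mapping into literal/char-class tokens plus a trailing literal, then matches port_pci against the token list with a single cursor in a second pass.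
-- crash fix: On inputs where the mapping's literal characters and bracket classes match port_pci but a bracket class falls exactly at port_pci's end, A raises IndexError (port_pci[pci_index + length] out of range) while B returns False. — e.g. on _match_pci("a", "a[bc]"): A raises IndexError, B returns false
import Mathlib
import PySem

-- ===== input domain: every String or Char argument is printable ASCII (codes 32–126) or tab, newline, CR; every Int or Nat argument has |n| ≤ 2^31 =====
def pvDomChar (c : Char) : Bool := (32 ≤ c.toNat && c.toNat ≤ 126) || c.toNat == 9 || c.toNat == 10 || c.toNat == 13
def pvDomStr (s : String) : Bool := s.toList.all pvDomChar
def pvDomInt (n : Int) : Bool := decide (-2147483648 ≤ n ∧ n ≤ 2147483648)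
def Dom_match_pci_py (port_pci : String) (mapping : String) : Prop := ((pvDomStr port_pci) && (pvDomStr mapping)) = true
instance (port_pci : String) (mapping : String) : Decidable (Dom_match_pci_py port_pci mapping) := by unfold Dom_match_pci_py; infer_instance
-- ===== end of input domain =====

-- B re-decomposes A's single bracket-scanning while-loop into tokenize-then-match (same cost);
-- equivalence of the RETURN values is proved on Pre_ (the inputs where Python A does not raise).

-- ===== PORT A =====
-- Port of A's while-loop; `fuel` only makes the recursion total (the call site supplies
-- mapping.length + 1, which the proof shows is always enough).  Where Python A raises
-- IndexError (port_pci[pci_index + length] out of range, pyGet? = none) the port returns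
-- false; exactly those inputs are excluded by Pre_match_pci_py.
def pvLoopA (pc mp : List Char) : Nat → Nat → Nat → Bool
  | 0, _, _ => false
  | fuel + 1, mi, pi =>
    -- bracket_start = mapping.find("[", mapping_index)
    let bs := PySem.Chars.findFrom mp ['['] (mi : Int)
    if bs = -1 then
      -- break: port_pci[pci_index:] != mapping[mapping_index:]
      decide (PySem.List.slice pc (some (pi : Int)) none = PySem.List.slice mp (some (mi : Int)) none)
    else
      -- bracket_end = mapping.find("]", bracket_start)
      let be := PySem.Chars.findFrom mp [']'] bs
      if be = -1 then
        decide (PySem.List.slice pc (some (pi : Int)) none = PySem.List.slice mp (some (mi : Int)) none)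
      else
        let length := bs.toNat - mi
        if length ≠ 0 ∧
            PySem.List.slice pc (some (pi : Int)) (some ((pi + length : Nat) : Int)) ≠
              PySem.List.slice mp (some (mi : Int)) (some bs) then
          false
        else
          match PySem.List.pyGet? pc ((pi + length : Nat) : Int) with
          | none => false   -- Python: IndexError (outside Pre_)
          | some c =>
            if PySem.Chars.isIn [c] (PySem.List.slice mp (some (bs + 1)) (some be)) then
              pvLoopA pc mp fuel (be.toNat + 1) (pi + length + 1)
            else false

def match_pci_py (port_pci : String) (mapping : String) : Bool :=
  if port_pci.toList = [] ∨ mapping.toList = [] then false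
  else if port_pci.toList = mapping.toList then true
  else pvLoopA port_pci.toList mapping.toList (mapping.toList.length + 1) 0 0

-- ===== PORT B =====
inductive PTok
  | lit : List Char → PTok
  | cls : List Char → PTok
deriving DecidableEq, Repr

-- _tokenize of Source B: literal/class tokens plus the trailing literal; `fuel` only makes the
-- while-loop total (the call site supplies mapping.length + 1, always enough).
def pvTokenize : Nat → List Char → List PTok × List Char
  | 0, rest => ([], rest)
  | fuel + 1, rest =>
    let j := PySem.Chars.find rest ['[']
    if j = -1 then ([], rest)
    else
      let k := PySem.Chars.findFrom rest [']'] j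
      if k = -1 then ([], rest)
      else
        let tl := pvTokenize fuel (rest.drop (k.toNat + 1))
        ((if 0 < j.toNat then [PTok.lit (PySem.List.slice rest none (some j))] else []) ++
          PTok.cls (PySem.List.slice rest (some (j + 1)) (some k)) :: tl.1, tl.2)

-- the second pass of Source B: match port_pci against the token list with one cursor
def pvMatchToks (pc : List Char) : List PTok → List Char → Nat → Bool
  | [], trailing, pos => decide (PySem.List.slice pc (some (pos : Int)) none = trailing)
  | PTok.lit s :: ts, trailing, pos =>
    if PySem.List.slice pc (some (pos : Int)) (some ((pos + s.length : Nat) : Int)) ≠ s then false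
    else pvMatchToks pc ts trailing (pos + s.length)
  | PTok.cls s :: ts, trailing, pos =>
    if h : pos < pc.length then
      if PySem.Chars.isIn [pc[pos]] s then pvMatchToks pc ts trailing (pos + 1) else false
    else false

def match_pci_py_alt (port_pci : String) (mapping : String) : Bool :=
  if port_pci.toList = [] ∨ mapping.toList = [] then false
  else if port_pci.toList = mapping.toList then true
  else
    let t := pvTokenize (mapping.toList.length + 1) mapping.toList
    pvMatchToks port_pci.toList t.1 t.2 0

-- ===== PRECONDITION & SPEC =====
-- pvRaisesGo scans the mapping once, character by character, against port_pci: outside a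
-- bracket a literal character must equal the next port_pci character; between '[' and ']' the
-- class characters are collected; at ']' the class must accept the next port_pci character —
-- and if port_pci is exhausted exactly there, the scan reports true (the position Python A
-- indexes out of range).
def pvRaisesGo : List Char → List Char → Bool → List Char → Bool
  | _, [], _, _ => false
  | pc, c :: r, false, _ =>
    if c = '[' then pvRaisesGo pc r true []
    else
      match pc with
      | [] => false
      | d :: pc' => if d = c then pvRaisesGo pc' r false [] else false
  | pc, c :: r, true, cls =>
    if c = ']' then
      match pc with
      | [] => true
      | d :: pc' => if d ∈ cls then pvRaisesGo pc' r false [] else false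
    else pvRaisesGo pc r true (cls ++ [c])

def pvRaisesLoop (pc mp : List Char) : Bool := pvRaisesGo pc mp false []

-- Pre_ excludes exactly the inputs on which Python A raises IndexError: those where, scanning the
-- mapping left to right, every literal character and bracket class matches port_pci and some
-- bracket class falls exactly at port_pci's end (so A indexes one past it).
def Pre_match_pci_py (port_pci : String) (mapping : String) : Prop :=
  port_pci.toList = [] ∨ port_pci = mapping ∨
    pvRaisesLoop port_pci.toList mapping.toList = false
instance (port_pci : String) (mapping : String) : Decidable (Pre_match_pci_py port_pci mapping) := by
  unfold Pre_match_pci_py; infer_instance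

def pvWitness_match_pci_py : String × String := ("0000:af:10.1", "0000:af:1[01].[1357]")

-- On the inputs excluded by Pre_ Python A raises IndexError while B returns False
-- (its cursor has run past the end of port_pci at a bracket class).
def Raises_match_pci_py (port_pci : String) (mapping : String) : Prop :=
  port_pci.toList ≠ [] ∧ port_pci ≠ mapping ∧
    pvRaisesLoop port_pci.toList mapping.toList = true
instance (port_pci : String) (mapping : String) : Decidable (Raises_match_pci_py port_pci mapping) := by
  unfold Raises_match_pci_py; infer_instance

def pvRaiseWitness_match_pci_py : String × String := ("a", "a[bc]")
def pvRaiseWitnessOut_match_pci_py : Bool := false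

def Spec_match_pci_py (port_pci : String) (mapping : String) (out : Bool) : Prop := out = match_pci_py_alt port_pci mapping
instance (port_pci : String) (mapping : String) (out : Bool) : Decidable (Spec_match_pci_py port_pci mapping out) := by unfold Spec_match_pci_py; infer_instance

-- ===== CLAIM (what is proved, stated in full; the proofs are below) =====
def Claim_equal_match_pci_py : Prop := ∀ (port_pci : String) (mapping : String), Dom_match_pci_py port_pci mapping → Pre_match_pci_py port_pci mapping → Spec_match_pci_py port_pci mapping (match_pci_py port_pci mapping)

def Claim_raises_match_pci_py : Prop := (∀ (port_pci : String) (mapping : String), Dom_match_pci_py port_pci mapping → Raises_match_pci_py port_pci mapping → ¬ Pre_match_pci_py port_pci mapping) ∧ (Dom_match_pci_py (pvRaiseWitness_match_pci_py.1) (pvRaiseWitness_match_pci_py.2) ∧ Raises_match_pci_py (pvRaiseWitness_match_pci_py.1) (pvRaiseWitness_match_pci_py.2) ∧ match_pci_py_alt (pvRaiseWitness_match_pci_py.1) (pvRaiseWitness_match_pci_py.2) = pvRaiseWitnessOut_match_pci_py)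

-- ===== LEMMAS AND PROOFS =====

-- the loop of A computes exactly B's token matching on the un-tokenized suffix of mapping
set_option maxRecDepth 8192 in
lemma pvLoopA_eq_matchToks (pc mp : List Char) :
    ∀ (fuel mi pi : Nat), mi ≤ mp.length → mp.length - mi < fuel →
      pvLoopA pc mp fuel mi pi =
        pvMatchToks pc (pvTokenize fuel (mp.drop mi)).1 (pvTokenize fuel (mp.drop mi)).2 pi := by
  intro fuel
  induction fuel with
  | zero => intro mi pi h1 h2; omega
  | succ fuel ih =>
    intro mi pi hmi hfuel
    have hfind1 := PySem.Chars.findFrom_natCast mp ['['] mi hmi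
    by_cases hj : PySem.Chars.find (mp.drop mi) ['['] = -1
    · simp only [pvLoopA, pvTokenize, hfind1, hj, if_true]
      simp [pvMatchToks]
    · -- a '[' was found at offset j in the suffix mp.drop mi
      have hj0 : 0 ≤ PySem.Chars.find (mp.drop mi) ['['] := by
        have := PySem.Chars.neg_one_le_find (mp.drop mi) ['[']
        omega
      obtain ⟨j, hjZ⟩ : ∃ j : Nat, PySem.Chars.find (mp.drop mi) ['['] = (j : Int) :=
        ⟨_, (Int.toNat_of_nonneg hj0).symm⟩
      have hjpre := (PySem.Chars.find_spec (s := mp.drop mi) (sub := ['[']) hj0).1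
      rw [hjZ] at hjpre
      have hjlt : j < (mp.drop mi).length := by
        have := hjpre.length_le
        simp [List.length_drop] at this ⊢
        omega
      have hmij : mi + j ≤ mp.length := by
        simp [List.length_drop] at hjlt
        omega
      have hbs : PySem.Chars.findFrom mp ['['] (mi : Int) = ((mi + j : Nat) : Int) := by
        rw [hfind1, if_neg hj, hjZ]
        push_cast
        ring
      have hfind2 := PySem.Chars.findFrom_natCast mp [']'] (mi + j) hmij
      have hdd : (mp.drop mi).drop j = mp.drop (mi + j) := by
        rw [List.drop_drop]
      by_cases hk : PySem.Chars.find (mp.drop (mi + j)) [']'] = -1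
      · -- no ']' after the '[': both sides fall back to the trailing literal compare
        simp only [pvLoopA, pvTokenize, hbs, hfind2, hk, if_true]
        have hkB : PySem.Chars.findFrom (mp.drop mi) [']'] ((j : Nat) : Int) = -1 := by
          rw [PySem.Chars.findFrom_natCast (mp.drop mi) [']'] j (le_of_lt hjlt), hdd]
          simp [hk]
        have hjne : ¬ ((j : Nat) : Int) = -1 := by omega
        simp [hjZ, hjne, hkB, pvMatchToks]
      · -- a full "[...]" bracket: literal check, class check, recurse
        have hk0 : 0 ≤ PySem.Chars.find (mp.drop (mi + j)) [']'] := by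
          have := PySem.Chars.neg_one_le_find (mp.drop (mi + j)) [']']
          omega
        obtain ⟨k2, hkZ⟩ : ∃ k2 : Nat, PySem.Chars.find (mp.drop (mi + j)) [']'] = (k2 : Int) :=
          ⟨_, (Int.toNat_of_nonneg hk0).symm⟩
        have hkpre := (PySem.Chars.find_spec (s := mp.drop (mi + j)) (sub := [']'])  hk0).1
        rw [hkZ] at hkpre
        have hklt : k2 < (mp.drop (mi + j)).length := by
          have := hkpre.length_le
          simp [List.length_drop] at this ⊢
          omega
        have hmk : mi + j + k2 < mp.length := by
          simp [List.length_drop] at hklt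
          omega
        have hbe : PySem.Chars.findFrom mp [']'] ((mi + j : Nat) : Int) = ((mi + j + k2 : Nat) : Int) := by
          rw [hfind2, if_neg (by rw [hkZ]; omega), hkZ]
          push_cast
          ring
        have hbeB : PySem.Chars.findFrom (mp.drop mi) [']'] ((j : Nat) : Int) = ((j + k2 : Nat) : Int) := by
          rw [PySem.Chars.findFrom_natCast (mp.drop mi) [']'] j (le_of_lt hjlt), hdd, hkZ,
            if_neg (by omega)]
          push_cast
          ring
        have h1 : ¬ ((mi + j : Nat) : Int) = -1 := by omega
        have h2 : ¬ ((mi + j + k2 : Nat) : Int) = -1 := by omega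
        have h3 : ¬ ((j : Nat) : Int) = -1 := by omega
        have h4 : ¬ ((j + k2 : Nat) : Int) = -1 := by omega
        simp only [pvLoopA, pvTokenize, hbs, hbe, hjZ, hbeB, h1, h2, h3, h4, if_false,
          Int.toNat_natCast, Nat.add_sub_cancel_left]
        have e1 : PySem.List.slice pc (some (pi : Int)) (some ((pi + j : Nat) : Int)) =
            List.take j (List.drop pi pc) := by
          rw [PySem.List.slice_natCast]
          congr 1
          omega
        have e2 : PySem.List.slice mp (some (mi : Int)) (some ((mi + j : Nat) : Int)) =
            List.take j (List.drop mi mp) := by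
          rw [PySem.List.slice_natCast]
          congr 1
          omega
        have e3 : PySem.List.slice (List.drop mi mp) none (some ((j : Nat) : Int)) =
            List.take j (List.drop mi mp) := PySem.List.slice_to_natCast _ _
        have ec1 : ((mi + j : Nat) : Int) + 1 = ((mi + j + 1 : Nat) : Int) := by push_cast; ring
        have ec2 : ((j : Nat) : Int) + 1 = ((j + 1 : Nat) : Int) := by push_cast; ring
        have e4 : PySem.List.slice mp (some (((mi + j : Nat) : Int) + 1)) (some ((mi + j + k2 : Nat) : Int)) =
            List.take (k2 - 1) (List.drop (mi + j + 1) mp) := by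
          rw [ec1, PySem.List.slice_natCast]
          congr 1
          omega
        have e5 : PySem.List.slice (List.drop mi mp) (some (((j : Nat) : Int) + 1)) (some ((j + k2 : Nat) : Int)) =
            List.take (k2 - 1) (List.drop (mi + j + 1) mp) := by
          rw [ec2, PySem.List.slice_natCast, List.drop_drop]
          have h' : mi + (j + 1) = mi + j + 1 := by omega
          rw [h']
          congr 1
          omega
        have e6 : List.drop (j + k2 + 1) (List.drop mi mp) = List.drop (mi + j + k2 + 1) mp := by
          rw [List.drop_drop]
          congr 1
          omega
        have ihuse : pvLoopA pc mp fuel (mi + j + k2 + 1) (pi + j + 1) =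
            pvMatchToks pc (pvTokenize fuel (mp.drop (mi + j + k2 + 1))).1
              (pvTokenize fuel (mp.drop (mi + j + k2 + 1))).2 (pi + j + 1) := by
          apply ih
          · omega
          · omega
        rw [e1, e2, e4, e5, e6]
        have hslen : (List.take j (List.drop mi mp)).length = j := by
          rw [List.length_take]
          omega
        have ecast : ((pi : Int) + (j : Int)) = ((pi + j : Nat) : Int) := by push_cast; ring
        by_cases hlit : List.take j (List.drop pi pc) = List.take j (List.drop mi mp)
        · by_cases hpL : pi + j < pc.length
          · have hget : pc[pi + j]? = some pc[pi + j] := List.getElem?_eq_getElem hpL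
            have hgetA : PySem.List.pyGet? pc ((pi : Int) + (j : Int)) = some pc[pi + j] := by
              rw [ecast, PySem.List.pyGet?_natCast, hget]
            have e1' : PySem.List.slice pc (some (pi : Int)) (some ((pi : Int) + (j : Int))) =
                List.take j (List.drop pi pc) := by
              rw [ecast]
              exact e1
            by_cases hj0' : 0 < j
            · have hjne0 : j ≠ 0 := by omega
              simp [pvMatchToks, hj0', hjne0, hslen, e1', hgetA, e3, hlit, ihuse, hpL]
            · have hj00 : j = 0 := by omega
              subst hj00
              simp only [Nat.add_zero] at hget hpL ihuse
              simp [pvMatchToks, hlit, ihuse, hpL]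
          · have hget : pc[pi + j]? = none := List.getElem?_eq_none (by omega)
            have hgetA : PySem.List.pyGet? pc ((pi : Int) + (j : Int)) = none := by
              rw [ecast, PySem.List.pyGet?_natCast, hget]
            have e1' : PySem.List.slice pc (some (pi : Int)) (some ((pi : Int) + (j : Int))) =
                List.take j (List.drop pi pc) := by
              rw [ecast]
              exact e1
            by_cases hj0' : 0 < j
            · have hjne0 : j ≠ 0 := by omega
              simp [pvMatchToks, hj0', hjne0, hslen, e1', hgetA, e3, hlit, hpL]
            · have hj00 : j = 0 := by omega
              subst hj00
              simp only [Nat.add_zero] at hget hpL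
              simp [pvMatchToks, hlit, hpL]
        · have hj0' : 0 < j := by
            by_contra h
            have : j = 0 := by omega
            subst this
            simp at hlit
          have hjne0 : j ≠ 0 := by omega
          have e1' : PySem.List.slice pc (some (pi : Int)) (some ((pi : Int) + (j : Int))) =
              List.take j (List.drop pi pc) := by
            rw [ecast]
            exact e1
          simp [pvMatchToks, hj0', hjne0, hslen, e1', e3, hlit]

-- ===== VERDICT (by name: the statement is the Claim_ definition above) =====
theorem match_pci_py_raises : Claim_raises_match_pci_py := by
  unfold Claim_raises_match_pci_py
  refine ⟨?_, by decide⟩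
  intro p m _ hr hpre
  rcases hpre with h | h | h
  · exact hr.1 h
  · exact hr.2.1 h
  · rw [hr.2.2] at h
    cases h

theorem match_pci_py_spec : Claim_equal_match_pci_py := by
  have _hA_raises_outside_Pre := match_pci_py_raises.1  -- records that the IndexError region is disjoint from Pre_
  intro p m _ _
  unfold Spec_match_pci_py match_pci_py match_pci_py_alt
  split
  · rfl
  · split
    · rfl
    · simpa using pvLoopA_eq_matchToks p.toList m.toList (m.toList.length + 1) 0 0
        (Nat.zero_le _) (by omega)
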